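-- pv_equiv track=rewrite | github.com/panagiotis-langaris/Importance-Evaluation-of-the-Embedding-Initialization-for-Information-Extraction | evaluation_functions.py | evaluate_RE
-- ===== SOURCE A (Python) =====
-- def evaluate_RE(predicted_rel, gold_rel, gold_chunks, predicted_chunks):
--     tp = 0
--     fn = 0
--     fp = 0
--     for p_r in predicted_rel:
--         drug_flag = 0
--         ae_flag = 0
--         # Check if the predicted pair is in gold list.
--         if p_r in gold_rel:
--             # Check if the span and type of name entities are correct.
--             for p_c in predicted_chunks:  ###===== chunks = [("DRUG", 0, 1), ("AE", 3, 3)] // list of (chunk_type, chunk_start, chunk_end)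
--                 if p_c in gold_chunks:
--                     if p_r[0] == p_c[2]:
--                         drug_flag = 1
--                     if p_r[1] == p_c[2]:
--                         ae_flag = 1
--
--         if (drug_flag) == 1 and (ae_flag == 1):
--             tp += 1
--         else:
--             fp += 1
--
--     for g_r in gold_rel:
--         if g_r not in predicted_rel:
--             fn += 1
--
--     return tp, fp, fn
-- ===== SOURCE B (Python) =====
-- def evaluate_RE(predicted_rel, gold_rel, gold_chunks, predicted_chunks):
--     # Hash-based single passes: set of ends of correctly-predicted chunks,
--     # then one lookup pass per relation list.
--     gold_chunk_set = set(gold_chunks)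
--     ends = {c[2] for c in predicted_chunks if c in gold_chunk_set}
--     gold_rel_set = set(gold_rel)
--     pred_rel_set = set(predicted_rel)
--     tp = sum(1 for p in predicted_rel
--              if p in gold_rel_set and p[0] in ends and p[1] in ends)
--     fp = len(predicted_rel) - tp
--     fn = sum(1 for g in gold_rel if g not in pred_rel_set)
--     return tp, fp, fn
-- ===== Notes on version B (the rewrite author's own statement) =====
-- stated objective: faster
-- what changed: Replaces the nested membership scans (each predicted relation rescans predicted_chunks, with 'in gold_chunks'/'in gold_rel' list scans inside) by hash sets built once - a set of chunk-ends whose chunk is gold-correct and sets of the relation lists - so tp/fp/fn are computed in single passes with O(1) lookups.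
import Mathlib
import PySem

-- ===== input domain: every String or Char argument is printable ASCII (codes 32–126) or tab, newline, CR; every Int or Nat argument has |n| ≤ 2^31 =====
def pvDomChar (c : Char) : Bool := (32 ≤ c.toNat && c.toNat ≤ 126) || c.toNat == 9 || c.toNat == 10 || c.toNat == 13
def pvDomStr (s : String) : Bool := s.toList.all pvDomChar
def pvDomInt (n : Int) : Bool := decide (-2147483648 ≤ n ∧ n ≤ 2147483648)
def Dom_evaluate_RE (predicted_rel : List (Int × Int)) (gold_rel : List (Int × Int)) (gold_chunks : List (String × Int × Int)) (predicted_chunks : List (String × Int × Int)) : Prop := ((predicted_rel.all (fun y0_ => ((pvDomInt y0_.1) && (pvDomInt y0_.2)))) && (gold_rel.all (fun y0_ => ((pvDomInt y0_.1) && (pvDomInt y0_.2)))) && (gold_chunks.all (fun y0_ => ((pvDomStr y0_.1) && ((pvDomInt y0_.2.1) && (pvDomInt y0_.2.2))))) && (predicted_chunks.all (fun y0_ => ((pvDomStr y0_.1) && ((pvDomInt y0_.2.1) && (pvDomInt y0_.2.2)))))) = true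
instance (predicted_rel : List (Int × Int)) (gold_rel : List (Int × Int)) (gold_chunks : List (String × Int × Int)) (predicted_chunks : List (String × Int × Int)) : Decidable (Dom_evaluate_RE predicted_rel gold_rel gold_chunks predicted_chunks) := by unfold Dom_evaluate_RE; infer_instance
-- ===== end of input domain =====

-- B replaces A's nested membership scans by hash sets built once (chunk-end set,
-- relation sets) and three single passes; objective: faster (asymptotic).

-- ===== PORT A =====
def evaluate_RE (predicted_rel : List (Int × Int)) (gold_rel : List (Int × Int)) (gold_chunks : List (String × Int × Int)) (predicted_chunks : List (String × Int × Int)) : Int × Int × Int :=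
  let tpfp := predicted_rel.foldl (fun (s : Int × Int) p_r =>
    let flags : Int × Int :=
      if p_r ∈ gold_rel then
        predicted_chunks.foldl (fun (f : Int × Int) p_c =>
          if p_c ∈ gold_chunks then
            (if p_r.1 = p_c.2.2 then 1 else f.1,
             if p_r.2 = p_c.2.2 then 1 else f.2)
          else f) (0, 0)
      else (0, 0)
    if flags.1 = 1 ∧ flags.2 = 1 then (s.1 + 1, s.2) else (s.1, s.2 + 1)) (0, 0)
  let fn := gold_rel.foldl (fun (n : Int) g_r => if g_r ∉ predicted_rel then n + 1 else n) 0
  (tpfp.1, tpfp.2, fn)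

-- ===== PORT B =====
def evaluate_RE_alt (predicted_rel : List (Int × Int)) (gold_rel : List (Int × Int)) (gold_chunks : List (String × Int × Int)) (predicted_chunks : List (String × Int × Int)) : Int × Int × Int :=
  let gold_chunk_set := PySem.Set.ofList gold_chunks
  let ends : PySem.Set Int := PySem.Set.ofList
    ((predicted_chunks.filter (fun c => decide (c ∈ gold_chunk_set))).map (fun c => c.2.2))
  let gold_rel_set := PySem.Set.ofList gold_rel
  let pred_rel_set := PySem.Set.ofList predicted_rel
  let tp : Int :=
    ((predicted_rel.filter (fun p => decide (p ∈ gold_rel_set ∧ p.1 ∈ ends ∧ p.2 ∈ ends))).length : Int)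
  let fp : Int := (predicted_rel.length : Int) - tp
  let fn : Int := ((gold_rel.filter (fun g => decide (g ∉ pred_rel_set))).length : Int)
  (tp, fp, fn)

-- ===== PRECONDITION & SPEC =====
def Spec_evaluate_RE (predicted_rel : List (Int × Int)) (gold_rel : List (Int × Int)) (gold_chunks : List (String × Int × Int)) (predicted_chunks : List (String × Int × Int)) (out : Int × Int × Int) : Prop := out = evaluate_RE_alt predicted_rel gold_rel gold_chunks predicted_chunks
instance (predicted_rel : List (Int × Int)) (gold_rel : List (Int × Int)) (gold_chunks : List (String × Int × Int)) (predicted_chunks : List (String × Int × Int)) (out : Int × Int × Int) : Decidable (Spec_evaluate_RE predicted_rel gold_rel gold_chunks predicted_chunks out) := by unfold Spec_evaluate_RE; infer_instance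

-- ===== CLAIM (what is proved, stated in full; the proofs are below) =====
def Claim_equal_evaluate_RE : Prop := ∀ (predicted_rel : List (Int × Int)) (gold_rel : List (Int × Int)) (gold_chunks : List (String × Int × Int)) (predicted_chunks : List (String × Int × Int)), Dom_evaluate_RE predicted_rel gold_rel gold_chunks predicted_chunks → Spec_evaluate_RE predicted_rel gold_rel gold_chunks predicted_chunks (evaluate_RE predicted_rel gold_rel gold_chunks predicted_chunks)

-- ===== LEMMAS AND PROOFS =====

-- the "good relation" predicate both programs decide per predicted relation
abbrev pvGood (gold_rel : List (Int × Int)) (gold_chunks predicted_chunks : List (String × Int × Int)) (p : Int × Int) : Prop :=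
  p ∈ gold_rel ∧ (∃ c ∈ predicted_chunks, c ∈ gold_chunks ∧ p.1 = c.2.2)
    ∧ (∃ c ∈ predicted_chunks, c ∈ gold_chunks ∧ p.2 = c.2.2)

-- A's inner flag loop, characterised
theorem pv_inner (gc : List (String × Int × Int)) (x y : Int) :
    ∀ (cs : List (String × Int × Int)) (d0 a0 : Int),
      cs.foldl (fun (f : Int × Int) c =>
          if c ∈ gc then
            (if x = c.2.2 then 1 else f.1, if y = c.2.2 then 1 else f.2)
          else f) (d0, a0)
      = ((if (∃ c ∈ cs, c ∈ gc ∧ x = c.2.2) then 1 else d0),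
         (if (∃ c ∈ cs, c ∈ gc ∧ y = c.2.2) then 1 else a0)) := by
  intro cs
  induction cs with
  | nil => intro d0 a0; simp
  | cons c cs ih =>
    intro d0 a0
    simp only [List.foldl_cons]
    by_cases hg : c ∈ gc
    · rw [if_pos hg, ih]
      congr 1 <;> [skip; skip] <;>
      · simp only [List.exists_mem_cons_iff]
        first
        | (by_cases hx : x = c.2.2 <;>
            by_cases hex : (∃ c' ∈ cs, c' ∈ gc ∧ x = c'.2.2) <;> simp [hx, hex, hg])
        | (by_cases hy : y = c.2.2 <;>
            by_cases hey : (∃ c' ∈ cs, c' ∈ gc ∧ y = c'.2.2) <;> simp [hy, hey, hg])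
    · rw [if_neg hg, ih]
      congr 1 <;> [skip; skip] <;>
      · simp only [List.exists_mem_cons_iff]
        congr 1
        simp [hg]

-- A's outer step is an if on pvGood
theorem pv_step (gr : List (Int × Int)) (gc pc : List (String × Int × Int))
    (s : Int × Int) (p : Int × Int) :
    (let flags : Int × Int :=
      if p ∈ gr then
        pc.foldl (fun (f : Int × Int) c =>
          if c ∈ gc then
            (if p.1 = c.2.2 then 1 else f.1, if p.2 = c.2.2 then 1 else f.2)
          else f) (0, 0)
      else (0, 0)
     if flags.1 = 1 ∧ flags.2 = 1 then (s.1 + 1, s.2) else (s.1, s.2 + 1))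
    = if pvGood gr gc pc p then (s.1 + 1, s.2) else (s.1, s.2 + 1) := by
  by_cases hg : p ∈ gr
  · simp only [if_pos hg, pv_inner]
    by_cases h1 : (∃ c ∈ pc, c ∈ gc ∧ p.1 = c.2.2) <;>
      by_cases h2 : (∃ c ∈ pc, c ∈ gc ∧ p.2 = c.2.2) <;>
      simp [pvGood, h1, h2, hg]
  · simp [pvGood, hg]

-- the outer fold counts pvGood and its complement
theorem pv_outer (gr : List (Int × Int)) (gc pc : List (String × Int × Int)) :
    ∀ (l : List (Int × Int)) (t f : Int),
      l.foldl (fun (s : Int × Int) p_r =>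
        let flags : Int × Int :=
          if p_r ∈ gr then
            pc.foldl (fun (f : Int × Int) p_c =>
              if p_c ∈ gc then
                (if p_r.1 = p_c.2.2 then 1 else f.1, if p_r.2 = p_c.2.2 then 1 else f.2)
              else f) (0, 0)
          else (0, 0)
        if flags.1 = 1 ∧ flags.2 = 1 then (s.1 + 1, s.2) else (s.1, s.2 + 1)) (t, f)
      = (t + ((l.filter (fun p => decide (pvGood gr gc pc p))).length : Int),
         f + ((l.length : Int) - ((l.filter (fun p => decide (pvGood gr gc pc p))).length : Int))) := by
  intro l
  induction l with
  | nil => intro t f; simp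
  | cons p l ih =>
    intro t f
    simp only [List.foldl_cons]
    rw [show (let flags : Int × Int :=
          if p ∈ gr then
            pc.foldl (fun (f : Int × Int) p_c =>
              if p_c ∈ gc then
                (if p.1 = p_c.2.2 then 1 else f.1, if p.2 = p_c.2.2 then 1 else f.2)
              else f) (0, 0)
          else (0, 0)
        if flags.1 = 1 ∧ flags.2 = 1 then ((t, f).1 + 1, (t, f).2) else ((t, f).1, (t, f).2 + 1))
      = if pvGood gr gc pc p then (t + 1, f) else (t, f + 1) from pv_step gr gc pc (t, f) p]
    by_cases hp : pvGood gr gc pc p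
    · rw [if_pos hp, ih]
      simp only [List.filter_cons, decide_eq_true hp, if_pos, List.length_cons, Prod.mk.injEq]
      constructor <;> push_cast <;> ring
    · rw [if_neg hp, ih]
      have hd : (decide (pvGood gr gc pc p)) = false := decide_eq_false hp
      simp only [List.filter_cons, hd, Bool.false_eq_true, List.length_cons, Prod.mk.injEq]
      constructor <;> push_cast <;> ring

-- the fn fold counts gold relations missing from predicted_rel
theorem pv_fn (pr : List (Int × Int)) :
    ∀ (l : List (Int × Int)) (n : Int),
      l.foldl (fun (n : Int) g => if g ∉ pr then n + 1 else n) n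
      = n + ((l.filter (fun g => decide (g ∉ pr))).length : Int) := by
  intro l
  induction l with
  | nil => intro n; simp
  | cons g l ih =>
    intro n
    simp only [List.foldl_cons]
    by_cases hg : g ∈ pr
    · rw [if_neg (not_not_intro hg), ih]
      simp [hg]
    · rw [if_pos hg, ih]
      simp only [List.filter_cons, decide_eq_true hg, if_pos, List.length_cons]
      push_cast; ring

-- B's filter predicate decides exactly pvGood
theorem pv_pred_eq (gr : List (Int × Int)) (gc pc : List (String × Int × Int)) (p : Int × Int) :
    (decide (p ∈ PySem.Set.ofList gr
        ∧ p.1 ∈ (PySem.Set.ofList ((pc.filter (fun c => decide (c ∈ PySem.Set.ofList gc))).map (fun c => c.2.2)) : PySem.Set Int)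
        ∧ p.2 ∈ (PySem.Set.ofList ((pc.filter (fun c => decide (c ∈ PySem.Set.ofList gc))).map (fun c => c.2.2)) : PySem.Set Int)))
    = decide (pvGood gr gc pc p) := by
  have hends : ∀ x : Int,
      x ∈ (pc.filter (fun c => decide (c ∈ gc))).map (fun c => c.2.2)
      ↔ (∃ c ∈ pc, c ∈ gc ∧ x = c.2.2) := by
    intro x
    simp only [List.mem_map, List.mem_filter, decide_eq_true_eq]
    constructor
    · rintro ⟨c, ⟨hpc, hgc⟩, rfl⟩; exact ⟨c, hpc, hgc, rfl⟩
    · rintro ⟨c, hpc, hgc, rfl⟩; exact ⟨c, ⟨hpc, hgc⟩, rfl⟩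
  rw [decide_eq_decide]
  simp only [PySem.Set.mem_ofList]
  exact and_congr Iff.rfl (and_congr (hends _) (hends _))

-- ===== VERDICT (by name: the statement is the Claim_ definition above) =====
theorem evaluate_RE_spec : Claim_equal_evaluate_RE := by
  intro pr gr gc pc _
  unfold Spec_evaluate_RE evaluate_RE evaluate_RE_alt
  simp only [pv_outer, pv_fn, pv_pred_eq]
  have hmem : ∀ g : Int × Int, (decide (g ∉ (PySem.Set.ofList pr : PySem.Set (Int × Int)))) = decide (g ∉ pr) := by
    intro g; simp [PySem.Set.mem_ofList]
  simp only [hmem]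
  simp
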